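-- pv_equiv track=rewrite | github.com/AngelicaDiazB14/Projects | Simplex-app-main/proyectoSimplex.py | invertir_signos
-- ===== SOURCE A (Python) =====
-- def invertir_signos(izquierda):
--     # Función para invertir los signos de todos los coeficientes en la parte izquierda
--     i = 0
--     nueva_izquierda = ""
--     for termino in izquierda:
--         if termino == '-' and i == 0:
--             nueva_izquierda += ""
--
--         elif termino.isdigit() and i == 0:
--             c = "-" + termino
--             nueva_izquierda += c
--
--         elif termino == "-" and i != 0:
--             nueva_izquierda += "+"
--
--         elif termino == "+" and i != 0:
--             nueva_izquierda += "-"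
--         else:
--             nueva_izquierda += termino
--         i += 1
--     return nueva_izquierda
-- ===== SOURCE B (Python) =====
-- _SWAP = str.maketrans('+-', '-+')
--
-- def invertir_signos(izquierda):
--     if not izquierda:
--         return ""
--     head, tail = izquierda[0], izquierda[1:]
--     if head == '-':
--         prefix = ""
--     elif head.isdigit():
--         prefix = "-" + head
--     else:
--         prefix = head
--     return prefix + tail.translate(_SWAP)
-- ===== Notes on version B (the rewrite author's own statement) =====
-- stated objective: idiomatic
-- what changed: Replaces the index-counting per-character loop (with repeated string concatenation) by a head/tail decomposition: the first character handled by a three-way case and the rest translated in one pass via a str.translate table swapping '+' and '-'.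
import Mathlib
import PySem

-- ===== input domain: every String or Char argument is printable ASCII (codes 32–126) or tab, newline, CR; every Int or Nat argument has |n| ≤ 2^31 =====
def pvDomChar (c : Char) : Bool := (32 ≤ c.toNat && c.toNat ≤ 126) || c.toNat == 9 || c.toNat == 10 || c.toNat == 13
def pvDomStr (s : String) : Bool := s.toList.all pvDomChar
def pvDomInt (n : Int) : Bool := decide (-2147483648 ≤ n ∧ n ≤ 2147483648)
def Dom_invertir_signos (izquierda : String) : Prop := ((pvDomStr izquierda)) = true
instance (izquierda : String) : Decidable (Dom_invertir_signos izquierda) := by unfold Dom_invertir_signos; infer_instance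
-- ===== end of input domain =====

-- B replaces A's index-counting loop by a head/tail decomposition with a translate table; equal return value, no speed claim.

-- ===== PORT A =====
-- A's for-loop over the characters with counter i and string accumulator, step for step.
-- A's loop body, step for step
def pvStepA (st : Nat × List Char) (termino : Char) : Nat × List Char :=
  let i := st.1
  let acc := st.2
  if termino == '-' && i == 0 then (i + 1, acc)
  else if PySem.Chars.isdigit termino && i == 0 then (i + 1, acc ++ ['-', termino])
  else if termino == '-' && !(i == 0) then (i + 1, acc ++ ['+'])
  else if termino == '+' && !(i == 0) then (i + 1, acc ++ ['-'])
  else (i + 1, acc ++ [termino])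

def invertir_signos (izquierda : String) : String :=
  let r := izquierda.toList.foldl pvStepA (0, [])
  String.mk r.2

-- ===== PORT B =====
-- the translate table {'+' ↦ '-', '-' ↦ '+'} as a character map
def pvSwapSign (c : Char) : Char :=
  if c == '+' then '-' else if c == '-' then '+' else c

def invertir_signos_alt (izquierda : String) : String :=
  match izquierda.toList with
  | [] => ""
  | head :: tail =>
    let pref :=
      if head == '-' then []
      else if PySem.Chars.isdigit head then ['-', head]
      else [head]
    String.mk (pref ++ tail.map pvSwapSign)

-- ===== PRECONDITION & SPEC =====
def Spec_invertir_signos (izquierda : String) (out : String) : Prop := out = invertir_signos_alt izquierda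
instance (izquierda : String) (out : String) : Decidable (Spec_invertir_signos izquierda out) := by unfold Spec_invertir_signos; infer_instance

-- ===== CLAIM (what is proved, stated in full; the proofs are below) =====
def Claim_equal_invertir_signos : Prop := ∀ (izquierda : String), Dom_invertir_signos izquierda → Spec_invertir_signos izquierda (invertir_signos izquierda)

-- ===== LEMMAS AND PROOFS =====

-- once i is positive, A's loop appends the sign-swapped characters one by one
theorem pvFoldA_pos (t : List Char) (n : Nat) (acc : List Char) :
    t.foldl pvStepA (n + 1, acc) = (n + 1 + t.length, acc ++ t.map pvSwapSign) := by
  induction t generalizing n acc with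
  | nil => simp
  | cons c t ih =>
      simp only [List.foldl_cons, List.map_cons, pvStepA]
      by_cases h1 : c = '-'
      · subst h1; simp [ih, pvSwapSign]; omega
      · by_cases h2 : c = '+'
        · subst h2; simp [ih, pvSwapSign]; omega
        · by_cases hd : PySem.Chars.isdigit c = true <;>
            simp [h1, h2, hd, ih, pvSwapSign] <;> omega

-- ===== VERDICT (by name: the statement is the Claim_ definition above) =====
theorem invertir_signos_spec : Claim_equal_invertir_signos := by
  unfold Claim_equal_invertir_signos
  intro izquierda _
  unfold Spec_invertir_signos invertir_signos invertir_signos_alt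
  cases h : izquierda.toList with
  | nil => rfl
  | cons head tail =>
      simp only [h, List.foldl_cons]
      have step1 : pvStepA (0, []) head =
          (1, if head == '-' then []
              else if PySem.Chars.isdigit head then ['-', head]
              else [head]) := by
        unfold pvStepA
        by_cases h1 : head = '-'
        · simp [h1]
        · by_cases h2 : PySem.Chars.isdigit head = true
          · simp [h1, h2]
          · by_cases h3 : head = '+'
            · subst h3; simp only [h2] at *; simp [h2]
            · simp [h1, h2, h3]
      rw [step1]
      have := pvFoldA_pos tail 0 (if head == '-' then []
              else if PySem.Chars.isdigit head then ['-', head]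
              else [head])
      simp only [Nat.zero_add] at this
      rw [this]
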